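-- pv_equiv track=rewrite | github.com/marinov98/AoC | 2023/day_11/day_11_puzzle.py | expand_galaxy
-- ===== SOURCE A (Python) =====
-- def expand_galaxy(initial_galaxy: list) -> tuple:
--     rows = len(initial_galaxy)
--     cols = len(initial_galaxy[0])
--     expansion_tracker = set()
--     for i in range(rows):
--         if has_no_galaxy("row", i, initial_galaxy):
--             expansion_tracker.add(("r", i))
--
--     for j in range(cols):
--         if has_no_galaxy("col", j, initial_galaxy):
--             expansion_tracker.add(("c", j))
--
--     galaxy_locations = []
--     for k in range(rows):
--         for l in range(cols):
--             if initial_galaxy[k][l] != ".":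
--                 galaxy_locations.append((k, l))
--
--     return expansion_tracker, galaxy_locations
--
-- def has_no_galaxy(check_type: str, check_num, initial_galaxy: list) -> bool:
--     if check_type == "row":
--         for col in initial_galaxy[check_num]:
--             if col == "#":
--                 return False
--         return True
--     elif check_type == "col":
--         for row_str in initial_galaxy:
--             if row_str[check_num] == "#":
--                 return False
--         return True
--     return False
-- ===== SOURCE B (Python) =====
-- def expand_galaxy(initial_galaxy: list) -> tuple:
--     cols = len(initial_galaxy[0])
--     cols_with_hash = set()
--     expansion_tracker = set()
--     galaxy_locations = []
--     for k, row in enumerate(initial_galaxy):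
--         if '#' not in row:
--             expansion_tracker.add(('r', k))
--         for l in range(cols):
--             ch = row[l]
--             if ch == '#':
--                 cols_with_hash.add(l)
--             if ch != '.':
--                 galaxy_locations.append((k, l))
--     for j in range(cols):
--         if j not in cols_with_hash:
--             expansion_tracker.add(('c', j))
--     return expansion_tracker, galaxy_locations
-- ===== Notes on version B (the rewrite author's own statement) =====
-- stated objective: alternative
-- what changed: A makes three separate passes (row-emptiness scan via a helper, column-emptiness scan re-reading every row per column, then a row-major location scan); B makes one pass over the grid that simultaneously records per-row '#'-freeness, a set of columns containing '#', and the galaxy locations, then derives the empty columns from that set.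
import Mathlib
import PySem

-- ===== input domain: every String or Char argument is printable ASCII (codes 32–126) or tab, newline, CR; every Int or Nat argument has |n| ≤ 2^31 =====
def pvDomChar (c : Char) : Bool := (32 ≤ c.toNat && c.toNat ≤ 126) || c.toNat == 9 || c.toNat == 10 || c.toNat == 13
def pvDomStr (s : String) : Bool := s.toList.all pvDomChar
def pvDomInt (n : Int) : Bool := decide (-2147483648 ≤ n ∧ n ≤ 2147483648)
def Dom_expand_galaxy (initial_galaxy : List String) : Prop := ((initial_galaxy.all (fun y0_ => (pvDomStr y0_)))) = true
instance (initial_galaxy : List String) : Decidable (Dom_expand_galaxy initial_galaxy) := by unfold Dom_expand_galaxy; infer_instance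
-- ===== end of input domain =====

-- B replaces A's three separate passes (per-row helper scan, per-column helper scan, row-major
-- location scan) by one pass over the grid collecting row-emptiness, the set of columns that
-- contain '#', and the galaxy locations together; same return value (objective: alternative).

-- ===== PORT A =====
-- helper has_no_galaxy, transliterated; the 'none' branches of pyGet? are Python IndexErrors,
-- excluded by Pre_expand_galaxy.
def has_no_galaxy (check_type : String) (check_num : Int) (initial_galaxy : List String) : Bool :=
  if check_type == "row" then
    match PySem.List.pyGet? initial_galaxy check_num with
    | some row => row.toList.all (fun c => !(c == '#'))   -- early return False on '#'
    | none => true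
  else if check_type == "col" then
    initial_galaxy.all (fun row =>
      match PySem.List.pyGet? row.toList check_num with
      | some c => !(c == '#')
      | none => true)
  else
    false

def expand_galaxy (initial_galaxy : List String) : (List (String × Int)) × (List (Int × Int)) :=
  let rows : Int := initial_galaxy.length
  let cols : Int := ((initial_galaxy.headD "").toList.length : Int)  -- len(g[0]); [] raises, excluded by Pre_
  let t1 : PySem.Set (String × Int) :=
    (PySem.List.pyRange 0 rows 1).foldl
      (fun acc i => if has_no_galaxy "row" i initial_galaxy then PySem.Set.add acc ("r", i) else acc)
      PySem.Set.empty
  let t2 : PySem.Set (String × Int) :=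
    (PySem.List.pyRange 0 cols 1).foldl
      (fun acc j => if has_no_galaxy "col" j initial_galaxy then PySem.Set.add acc ("c", j) else acc)
      t1
  let locs : List (Int × Int) :=
    (PySem.List.pyRange 0 rows 1).foldl
      (fun acc k =>
        (PySem.List.pyRange 0 cols 1).foldl
          (fun acc2 l =>
            if (match PySem.List.pyGet? (PySem.List.pyGetD initial_galaxy k "").toList l with
                | some c => c != '.'
                | none => false)
            then acc2 ++ [(k, l)] else acc2)
          acc)
      []
  (t2, locs)

-- ===== PORT B =====
def expand_galaxy_alt (initial_galaxy : List String) : (List (String × Int)) × (List (Int × Int)) :=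
  let cols : Int := ((initial_galaxy.headD "").toList.length : Int)  -- len(g[0]); [] raises, excluded by Pre_
  let st :=
    (PySem.List.enumerate initial_galaxy 0).foldl
      (fun (st : PySem.Set (String × Int) × PySem.Set Int × List (Int × Int)) kr =>
        ((if PySem.Chars.isIn ['#'] kr.2.toList then st.1 else PySem.Set.add st.1 ("r", kr.1)),
         (PySem.List.pyRange 0 cols 1).foldl
           (fun (p : PySem.Set Int × List (Int × Int)) l =>
             match PySem.List.pyGet? kr.2.toList l with
             | some ch =>
                 ((if ch == '#' then PySem.Set.add p.1 l else p.1),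
                  (if ch != '.' then p.2 ++ [(kr.1, l)] else p.2))
             | none => p)   -- IndexError, excluded by Pre_
           st.2))
      (PySem.Set.empty, PySem.Set.empty, [])
  let tracker : PySem.Set (String × Int) :=
    (PySem.List.pyRange 0 cols 1).foldl
      (fun t j => if PySem.Set.contains st.2.1 j then t else PySem.Set.add t ("c", j))
      st.1
  (tracker, st.2.2)

-- ===== PRECONDITION & SPEC =====
-- Pre_ excludes exactly the inputs on which Python A raises IndexError: the empty grid
-- (initial_galaxy[0]) and grids with a row shorter than the first row.
def Pre_expand_galaxy (initial_galaxy : List String) : Prop :=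
  initial_galaxy ≠ [] ∧
  ∀ row ∈ initial_galaxy, (initial_galaxy.headD "").toList.length ≤ row.toList.length
instance (initial_galaxy : List String) : Decidable (Pre_expand_galaxy initial_galaxy) := by
  unfold Pre_expand_galaxy; infer_instance

def pvWitness_expand_galaxy : List String := ["#..", ".x.", "..."]

def Spec_expand_galaxy (initial_galaxy : List String) (out : (List (String × Int)) × (List (Int × Int))) : Prop := out = expand_galaxy_alt initial_galaxy
instance (initial_galaxy : List String) (out : (List (String × Int)) × (List (Int × Int))) : Decidable (Spec_expand_galaxy initial_galaxy out) := by unfold Spec_expand_galaxy; infer_instance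

-- ===== CLAIM (what is proved, stated in full; the proofs are below) =====
def Claim_equal_expand_galaxy : Prop := ∀ (initial_galaxy : List String), Dom_expand_galaxy initial_galaxy → Pre_expand_galaxy initial_galaxy → Spec_expand_galaxy initial_galaxy (expand_galaxy initial_galaxy)


-- ===== LEMMAS AND PROOFS =====

-- proof-only step functions: the three components of B's single-pass fold
def pvRowStep (t : PySem.Set (String × Int)) (kr : Int × String) : PySem.Set (String × Int) :=
  if PySem.Chars.isIn ['#'] kr.2.toList then t else PySem.Set.add t ("r", kr.1)

def pvColStep (cols : Int) (c : PySem.Set Int) (kr : Int × String) : PySem.Set Int :=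
  (PySem.List.pyRange 0 cols 1).foldl
    (fun s l => if PySem.List.pyGet? kr.2.toList l = some '#' then PySem.Set.add s l else s) c

def pvLocStep (cols : Int) (lo : List (Int × Int)) (kr : Int × String) : List (Int × Int) :=
  (PySem.List.pyRange 0 cols 1).foldl
    (fun lo2 l =>
      match PySem.List.pyGet? kr.2.toList l with
      | some ch => if ch != '.' then lo2 ++ [(kr.1, l)] else lo2
      | none => lo2) lo

theorem pv_all_ne_eq_not_contains (cs : List Char) :
    (cs.all fun c => !(c == '#')) = !(cs.contains '#') := by
  induction cs with
  | nil => rfl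
  | cons a t ih =>
    by_cases h : a = '#'
    · subst h; simp [List.all_cons]
    · simp [List.all_cons, ih, h, Ne.symm h]

theorem pv_isIn_singleton (cs : List Char) : PySem.Chars.isIn ['#'] cs = cs.contains '#' := by
  have h1 : PySem.Chars.isIn ['#'] cs = true ↔ '#' ∈ cs := by
    rw [PySem.Chars.isIn_iff_infix]; exact List.singleton_infix_iff _ _
  have h2 : cs.contains '#' = true ↔ '#' ∈ cs := List.contains_iff_mem
  exact Bool.eq_iff_iff.mpr (h1.trans h2.symm)

theorem pv_mem_foldl_add_ite (L : List Int) (P : Int → Prop) [DecidablePred P]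
    (s : PySem.Set Int) (x : Int) :
    x ∈ L.foldl (fun s l => if P l then PySem.Set.add s l else s) s ↔
      x ∈ s ∨ (x ∈ L ∧ P x) := by
  induction L generalizing s with
  | nil => simp
  | cons a t ih =>
    simp only [List.foldl_cons]
    rw [ih]
    by_cases h : P a
    · simp only [if_pos h, PySem.Set.mem_add, List.mem_cons]
      constructor
      · rintro (⟨hx | rfl⟩ | ⟨hxt, hPx⟩)
        · exact Or.inl hx
        · exact Or.inr ⟨Or.inl rfl, h⟩
        · exact Or.inr ⟨Or.inr hxt, hPx⟩
      · rintro (hx | ⟨rfl | hxt, hPx⟩)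
        · exact Or.inl (Or.inl hx)
        · exact Or.inl (Or.inr rfl)
        · exact Or.inr ⟨hxt, hPx⟩
    · simp only [if_neg h, List.mem_cons]
      constructor
      · rintro (hx | ⟨hxt, hPx⟩)
        · exact Or.inl hx
        · exact Or.inr ⟨Or.inr hxt, hPx⟩
      · rintro (hx | ⟨rfl | hxt, hPx⟩)
        · exact Or.inl hx
        · exact absurd hPx h
        · exact Or.inr ⟨hxt, hPx⟩

theorem pv_mem_colfold (g : List String) (cols : Int) (C : PySem.Set Int) (x : Int) :
    x ∈ g.foldl (fun c row =>
        (PySem.List.pyRange 0 cols 1).foldl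
          (fun s l => if PySem.List.pyGet? row.toList l = some '#' then PySem.Set.add s l else s) c) C ↔
      x ∈ C ∨ (x ∈ PySem.List.pyRange 0 cols 1 ∧ ∃ row ∈ g, PySem.List.pyGet? row.toList x = some '#') := by
  induction g generalizing C with
  | nil => simp
  | cons a t ih =>
    simp only [List.foldl_cons]
    rw [ih, pv_mem_foldl_add_ite]
    simp only [List.mem_cons]
    constructor
    · rintro ((hx | ⟨hr, hp⟩) | ⟨hr, row, hrow, hp⟩)
      · exact Or.inl hx
      · exact Or.inr ⟨hr, a, Or.inl rfl, hp⟩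
      · exact Or.inr ⟨hr, row, Or.inr hrow, hp⟩
    · rintro (hx | ⟨hr, row, (rfl | hrow), hp⟩)
      · exact Or.inl (Or.inl hx)
      · exact Or.inl (Or.inr ⟨hr, hp⟩)
      · exact Or.inr ⟨hr, row, hrow, hp⟩

-- B's single fold splits into the three independent component folds
theorem pv_fold_split (E : List (Int × String)) (cols : Int)
    (T : PySem.Set (String × Int)) (C : PySem.Set Int) (L : List (Int × Int)) :
    E.foldl
      (fun (st : PySem.Set (String × Int) × PySem.Set Int × List (Int × Int)) kr =>
        ((if PySem.Chars.isIn ['#'] kr.2.toList then st.1 else PySem.Set.add st.1 ("r", kr.1)),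
         (PySem.List.pyRange 0 cols 1).foldl
           (fun (p : PySem.Set Int × List (Int × Int)) l =>
             match PySem.List.pyGet? kr.2.toList l with
             | some ch =>
                 ((if ch == '#' then PySem.Set.add p.1 l else p.1),
                  (if ch != '.' then p.2 ++ [(kr.1, l)] else p.2))
             | none => p)
           st.2))
      (T, C, L)
    = (E.foldl pvRowStep T, E.foldl (pvColStep cols) C, E.foldl (pvLocStep cols) L) := by
  have hinner : ∀ (kr : Int × String) (p : PySem.Set Int × List (Int × Int)),
      (PySem.List.pyRange 0 cols 1).foldl
        (fun (p : PySem.Set Int × List (Int × Int)) l =>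
          match PySem.List.pyGet? kr.2.toList l with
          | some ch =>
              ((if ch == '#' then PySem.Set.add p.1 l else p.1),
               (if ch != '.' then p.2 ++ [(kr.1, l)] else p.2))
          | none => p) p
      = (pvColStep cols p.1 kr, pvLocStep cols p.2 kr) := by
    intro kr p
    have hb : (fun (p : PySem.Set Int × List (Int × Int)) l =>
        match PySem.List.pyGet? kr.2.toList l with
        | some ch =>
            ((if ch == '#' then PySem.Set.add p.1 l else p.1),
             (if ch != '.' then p.2 ++ [(kr.1, l)] else p.2))
        | none => p)
      = (fun (p : PySem.Set Int × List (Int × Int)) l =>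
          ((if PySem.List.pyGet? kr.2.toList l = some '#' then PySem.Set.add p.1 l else p.1),
           (match PySem.List.pyGet? kr.2.toList l with
            | some ch => if ch != '.' then p.2 ++ [(kr.1, l)] else p.2
            | none => p.2))) := by
      funext p l
      cases hc : PySem.List.pyGet? kr.2.toList l with
      | none => simp
      | some ch => by_cases h : ch = '#' <;> simp [h]
    rw [hb]
    exact PySem.List.foldl_prod_mk
      (fun s l => if PySem.List.pyGet? kr.2.toList l = some '#' then PySem.Set.add s l else s)
      (fun lo2 l =>
        match PySem.List.pyGet? kr.2.toList l with
        | some ch => if ch != '.' then lo2 ++ [(kr.1, l)] else lo2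
        | none => lo2)
      (PySem.List.pyRange 0 cols 1) p.1 p.2
  have hbody : (fun (st : PySem.Set (String × Int) × PySem.Set Int × List (Int × Int)) kr =>
      ((if PySem.Chars.isIn ['#'] kr.2.toList then st.1 else PySem.Set.add st.1 ("r", kr.1)),
       (PySem.List.pyRange 0 cols 1).foldl
         (fun (p : PySem.Set Int × List (Int × Int)) l =>
           match PySem.List.pyGet? kr.2.toList l with
           | some ch =>
               ((if ch == '#' then PySem.Set.add p.1 l else p.1),
                (if ch != '.' then p.2 ++ [(kr.1, l)] else p.2))
           | none => p)
         st.2))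
    = (fun st kr => (pvRowStep st.1 kr,
        (fun (p : PySem.Set Int × List (Int × Int)) kr =>
          (pvColStep cols p.1 kr, pvLocStep cols p.2 kr)) st.2 kr)) := by
    funext st kr
    simp only [hinner]
    rfl
  rw [hbody]
  refine (PySem.List.foldl_prod_mk pvRowStep
      (fun (p : PySem.Set Int × List (Int × Int)) kr => (pvColStep cols p.1 kr, pvLocStep cols p.2 kr))
      E T (C, L)).trans ?_
  rw [PySem.List.foldl_prod_mk (pvColStep cols) (pvLocStep cols) E C L]

-- B's port, rewritten as the three separated component folds
theorem pv_alt_eq (g : List String) :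
    expand_galaxy_alt g =
      ((PySem.List.pyRange 0 ((g.headD "").toList.length : Int) 1).foldl
         (fun t j =>
           if PySem.Set.contains
               ((PySem.List.enumerate g 0).foldl (pvColStep ((g.headD "").toList.length : Int)) PySem.Set.empty) j
           then t else PySem.Set.add t ("c", j))
         ((PySem.List.enumerate g 0).foldl pvRowStep PySem.Set.empty),
       (PySem.List.enumerate g 0).foldl (pvLocStep ((g.headD "").toList.length : Int)) []) := by
  simp only [expand_galaxy_alt, pv_fold_split]

theorem pv_get_some (g : List String) (j : Int) (h0 : 0 ≤ j) (h1 : j < (g.length : Int)) :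
    PySem.List.pyGet? g j = some (PySem.List.pyGetD g j "") := by
  have hlt : j.toNat < g.length := by omega
  rw [PySem.List.pyGet?_of_nonneg g h0, PySem.List.pyGetD_of_nonneg g "" h0]
  simp [List.getElem?_eq_getElem hlt, List.getD_eq_getElem?_getD]

theorem pv_rows_eq (g : List String) :
    (PySem.List.enumerate g 0).foldl pvRowStep PySem.Set.empty
      = (PySem.List.pyRange 0 (g.length : Int) 1).foldl
          (fun acc i => if has_no_galaxy "row" i g then PySem.Set.add acc ("r", i) else acc)
          PySem.Set.empty := by
  rw [PySem.List.enumerate_eq_map_pyRange g "", List.foldl_map]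
  simp only [PySem.List.len_eq]
  refine PySem.List.foldl_congr_mem' _ _ _ _ ?_
  intro j hj acc
  obtain ⟨h0, h1⟩ := PySem.List.mem_pyRange_one.mp hj
  have hg := pv_get_some g j h0 h1
  simp only [pvRowStep, has_no_galaxy, hg]
  rw [pv_isIn_singleton, pv_all_ne_eq_not_contains]
  cases hcont : (PySem.List.pyGetD g j "").toList.contains '#' <;> simp [hcont]

theorem pv_locs_eq (g : List String) (cols : Int) :
    (PySem.List.enumerate g 0).foldl (pvLocStep cols) []
      = (PySem.List.pyRange 0 (g.length : Int) 1).foldl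
          (fun acc k =>
            (PySem.List.pyRange 0 cols 1).foldl
              (fun acc2 l =>
                if (match PySem.List.pyGet? (PySem.List.pyGetD g k "").toList l with
                    | some c => c != '.'
                    | none => false)
                then acc2 ++ [(k, l)] else acc2) acc) [] := by
  rw [PySem.List.enumerate_eq_map_pyRange g "", List.foldl_map]
  simp only [PySem.List.len_eq]
  refine PySem.List.foldl_congr_mem' _ _ _ _ ?_
  intro k hk acc
  simp only [pvLocStep]
  refine PySem.List.foldl_congr_mem' _ _ _ _ ?_
  intro l hl acc2
  cases hc : PySem.List.pyGet? (PySem.List.pyGetD g k "").toList l <;> simp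

theorem pv_col_cond (g : List String) (cols j : Int) (hj : j ∈ PySem.List.pyRange 0 cols 1) :
    has_no_galaxy "col" j g
      = !(PySem.Set.contains ((PySem.List.enumerate g 0).foldl (pvColStep cols) PySem.Set.empty) j) := by
  have hsnd : (PySem.List.enumerate g 0).foldl (pvColStep cols) PySem.Set.empty
      = g.foldl (fun c row =>
          (PySem.List.pyRange 0 cols 1).foldl
            (fun s l => if PySem.List.pyGet? row.toList l = some '#' then PySem.Set.add s l else s) c)
          PySem.Set.empty := by
    conv_rhs => rw [← PySem.List.map_snd_enumerate g 0]
    rw [List.foldl_map]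
    rfl
  have hall : (has_no_galaxy "col" j g = true) ↔
      ∀ row ∈ g, ¬ (PySem.List.pyGet? row.toList j = some '#') := by
    simp only [has_no_galaxy, show (("col" : String) == "row") = false from rfl,
      show (("col" : String) == "col") = true from rfl, Bool.false_eq_true, if_false, if_true,
      List.all_eq_true]
    refine forall_congr' fun row => ?_
    refine imp_congr_right fun _ => ?_
    cases hc : PySem.List.pyGet? row.toList j with
    | none => simp
    | some c => simp [hc]
  have hc2 : (PySem.Set.contains ((PySem.List.enumerate g 0).foldl (pvColStep cols) PySem.Set.empty) j = true)
      ↔ ∃ row ∈ g, PySem.List.pyGet? row.toList j = some '#' := by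
    have hmem : PySem.Set.contains ((PySem.List.enumerate g 0).foldl (pvColStep cols) PySem.Set.empty) j = true
        ↔ j ∈ (PySem.List.enumerate g 0).foldl (pvColStep cols) PySem.Set.empty := by
      unfold PySem.Set.contains
      exact List.contains_iff_mem
    rw [hmem, hsnd, pv_mem_colfold]
    simp [PySem.Set.empty, hj]
  cases hcont : PySem.Set.contains ((PySem.List.enumerate g 0).foldl (pvColStep cols) PySem.Set.empty) j with
  | true =>
    obtain ⟨row, hrow, hp⟩ := hc2.mp hcont
    simp only [Bool.not_true]
    rw [Bool.eq_false_iff]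
    intro hA
    exact (hall.mp hA) row hrow hp
  | false =>
    simp only [Bool.not_false]
    refine hall.mpr ?_
    intro row hrow hp
    exact absurd (hc2.mpr ⟨row, hrow, hp⟩) (by rw [hcont]; exact Bool.false_ne_true)

-- ===== VERDICT (by name: the statement is the Claim_ definition above) =====
theorem expand_galaxy_spec : Claim_equal_expand_galaxy := by
  intro g _hdom _hpre
  show expand_galaxy g = expand_galaxy_alt g
  rw [pv_alt_eq]
  simp only [expand_galaxy]
  refine Prod.ext ?_ ?_
  · dsimp only
    rw [pv_rows_eq]
    refine PySem.List.foldl_congr_mem' _ _ _ _ ?_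
    intro j hj acc
    rw [pv_col_cond g _ j hj]
    cases hcont : PySem.Set.contains
        ((PySem.List.enumerate g 0).foldl (pvColStep ((g.headD "").toList.length : Int)) PySem.Set.empty) j <;>
      simp
  · dsimp only
    rw [pv_locs_eq]
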